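-- pv_equiv track=rewrite | github.com/shaneholloman/hegelion | hegelion/parsing.py | strip_markdown_wrappers
-- ===== SOURCE A (Python) =====
-- def strip_markdown_wrappers(text: str) -> str:
--     """Remove markdown formatting wrappers like **, __, *, _ from text."""
--     trimmed = text.strip()
--     if not trimmed:
--         return ""
--     markers = ("**", "__", "*", "_")
--     changed = True
--     while changed and trimmed:
--         changed = False
--         for marker in markers:
--             if (
--                 trimmed.startswith(marker)
--                 and trimmed.endswith(marker)
--                 and len(trimmed) > 2 * len(marker)
--             ):
--                 trimmed = trimmed[len(marker) : -len(marker)].strip()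
--                 changed = True
--     return trimmed
-- ===== SOURCE B (Python) =====
-- def strip_markdown_wrappers(text: str) -> str:
--     """Remove markdown formatting wrappers like **, __, *, _ from text."""
--     trimmed = text.strip()
--     if not trimmed:
--         return ""
--     for marker in ("**", "__", "*", "_"):
--         n = len(marker)
--         if (
--             trimmed.startswith(marker)
--             and trimmed.endswith(marker)
--             and len(trimmed) > 2 * n
--         ):
--             return strip_markdown_wrappers(trimmed[n:-n])
--     return trimmed
-- ===== Notes on version B (the rewrite author's own statement) =====
-- stated objective: simpler
-- what changed: A's fixpoint while-loop, which sweeps all four markers per pass under a boolean change flag, is replaced by a recursion that strips the text, peels the first matching marker and recurses; the proof shows the two peel orders are confluent.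
import Mathlib
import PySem

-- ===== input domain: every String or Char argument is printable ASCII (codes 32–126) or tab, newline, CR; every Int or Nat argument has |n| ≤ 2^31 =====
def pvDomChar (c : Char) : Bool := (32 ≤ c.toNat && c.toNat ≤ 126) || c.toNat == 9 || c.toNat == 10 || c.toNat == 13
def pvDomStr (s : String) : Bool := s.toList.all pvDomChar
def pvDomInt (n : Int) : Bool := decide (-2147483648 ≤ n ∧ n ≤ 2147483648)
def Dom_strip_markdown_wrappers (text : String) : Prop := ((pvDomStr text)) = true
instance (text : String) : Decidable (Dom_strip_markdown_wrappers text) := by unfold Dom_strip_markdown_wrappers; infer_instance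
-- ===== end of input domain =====

-- B replaces A's fixpoint while-loop (one pass over the four markers per iteration, with a
-- 'changed' flag) by a recursion that peels the first matching marker and recurses; objective:
-- simpler.  Both work on text.toList; the proof shows both equal a common normal form.

-- ===== PORT A =====
-- markers = ("**", "__", "*", "_")
def pvMarkers : List (List Char) := [['*','*'], ['_','_'], ['*'], ['_']]

-- trimmed.startswith(marker) and trimmed.endswith(marker) and len(trimmed) > 2*len(marker)
def pvMatches (m t : List Char) : Bool :=
  PySem.Chars.startswith t m && PySem.Chars.endswith t m && decide (2 * m.length < t.length)

-- trimmed[len(marker):-len(marker)]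
def pvCut (m t : List Char) : List Char :=
  PySem.List.slice t (some (m.length : Int)) (some (-(m.length : Int)))

-- body of A's `for marker in markers` loop: state = (trimmed, changed)
def pvStepA (st : List Char × Bool) (m : List Char) : List Char × Bool :=
  if pvMatches m st.1 then (PySem.Chars.strip (pvCut m st.1), true) else st

-- one full `for marker in markers` pass, starting from changed = False
def pvPassA (t : List Char) : List Char × Bool :=
  List.foldl pvStepA (t, false) pvMarkers

lemma pvStrip_length_le (l : List Char) : (PySem.Chars.strip l).length ≤ l.length := by
  simp only [PySem.Chars.strip, PySem.Chars.rstrip, PySem.Chars.lstrip, List.length_reverse]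
  exact le_trans (List.length_dropWhile_le _ _)
    (by simpa using List.length_dropWhile_le PySem.Chars.isspace l)

lemma pvCut_length_lt {m t : List Char} (h : pvMatches m t = true) :
    (pvCut m t).length < t.length := by
  simp only [pvMatches, Bool.and_eq_true, decide_eq_true_eq] at h
  simp only [pvCut, PySem.List.slice, PySem.List.clampIdx, List.length_take, List.length_drop]
  split_ifs <;> simp_all <;> omega

lemma pvFoldTrue_length_le (ms : List (List Char)) (t : List Char) :
    (List.foldl pvStepA (t, true) ms).1.length ≤ t.length ∧
    (List.foldl pvStepA (t, true) ms).2 = true := by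
  induction ms generalizing t with
  | nil => simp
  | cons m ms ih =>
    simp only [List.foldl_cons]
    by_cases hm : pvMatches m t = true
    · simp only [pvStepA, hm, if_true]
      refine ⟨le_trans (ih _).1 ?_, (ih _).2⟩
      exact le_of_lt (lt_of_le_of_lt (pvStrip_length_le _) (pvCut_length_lt hm))
    · simp only [pvStepA, hm, if_false, Bool.false_eq_true]
      exact ih t

lemma pvFoldFalse (ms : List (List Char)) (t : List Char) :
    List.foldl pvStepA (t, false) ms = (t, false) ∨
    ((List.foldl pvStepA (t, false) ms).2 = true ∧
     (List.foldl pvStepA (t, false) ms).1.length < t.length) := by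
  induction ms with
  | nil => exact Or.inl rfl
  | cons m ms ih =>
    simp only [List.foldl_cons]
    by_cases hm : pvMatches m t = true
    · simp only [pvStepA, hm, if_true]
      refine Or.inr ⟨(pvFoldTrue_length_le ms _).2, ?_⟩
      exact lt_of_le_of_lt (pvFoldTrue_length_le ms _).1
        (lt_of_le_of_lt (pvStrip_length_le _) (pvCut_length_lt hm))
    · simpa only [pvStepA, hm, if_false, Bool.false_eq_true] using ih

lemma pvPassA_true_lt {t u : List Char} (h : pvPassA t = (u, true)) :
    u.length < t.length := by
  rcases pvFoldFalse pvMarkers t with h' | h'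
  · rw [pvPassA] at h; rw [h'] at h; simp at h
  · rw [pvPassA] at h; rw [h] at h'; exact h'.2

-- while changed and trimmed: changed = False; <pass>;  return trimmed
def pvLoopA (t : List Char) : List Char :=
  match h : pvPassA t with
  | (u, true) => if u = [] then u else pvLoopA u
  | (u, false) => u
termination_by t.length
decreasing_by exact pvPassA_true_lt h

def strip_markdown_wrappers (text : String) : String :=
  let trimmed := PySem.Chars.strip text.toList
  if trimmed = [] then "" else String.ofList (pvLoopA trimmed)

-- ===== PORT B =====
-- Source B's `for marker in (...): ... return strip_markdown_wrappers(...)` = first matching marker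
def pvFirstMarker (t : List Char) : Option (List Char) :=
  pvMarkers.find? (fun m => pvMatches m t)

lemma pvFirstMarker_matches {t m : List Char} (h : pvFirstMarker t = some m) :
    pvMatches m t = true := by
  simpa using List.find?_some (show List.find? (fun m => pvMatches m t) pvMarkers = some m from h)

def pvAltCore (l : List Char) : List Char :=
  let t := PySem.Chars.strip l
  if t = [] then []
  else
    match h : pvFirstMarker t with
    | some m => pvAltCore (pvCut m t)
    | none => t
termination_by l.length
decreasing_by
  exact lt_of_lt_of_le (pvCut_length_lt (pvFirstMarker_matches h)) (pvStrip_length_le l)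

def strip_markdown_wrappers_alt (text : String) : String :=
  String.ofList (pvAltCore text.toList)

-- ===== PRECONDITION & SPEC =====
def Spec_strip_markdown_wrappers (text : String) (out : String) : Prop := out = strip_markdown_wrappers_alt text
instance (text : String) (out : String) : Decidable (Spec_strip_markdown_wrappers text out) := by unfold Spec_strip_markdown_wrappers; infer_instance

-- ===== CLAIM (what is proved, stated in full; the proofs are below) =====
def Claim_equal_strip_markdown_wrappers : Prop := ∀ (text : String), Dom_strip_markdown_wrappers text → Spec_strip_markdown_wrappers text (strip_markdown_wrappers text)

-- ===== LEMMAS AND PROOFS =====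

-- the common normal form: peel the first matching marker (with re-strip), repeat
def pvNorm (t : List Char) : List Char :=
  match h : pvFirstMarker t with
  | some m => pvNorm (PySem.Chars.strip (pvCut m t))
  | none => t
termination_by t.length
decreasing_by
  exact lt_of_le_of_lt (pvStrip_length_le _) (pvCut_length_lt (pvFirstMarker_matches h))

lemma pvNorm_none {t : List Char} (h : pvFirstMarker t = none) : pvNorm t = t := by
  conv_lhs => unfold pvNorm
  split <;> simp_all

lemma pvNorm_some {t m : List Char} (h : pvFirstMarker t = some m) :
    pvNorm t = pvNorm (PySem.Chars.strip (pvCut m t)) := by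
  conv_lhs => unfold pvNorm
  split <;> simp_all

lemma pvNorm_nil : pvNorm [] = [] := by
  apply pvNorm_none; rfl

lemma pvLoopA_true {t u : List Char} (h : pvPassA t = (u, true)) :
    pvLoopA t = if u = [] then u else pvLoopA u := by
  conv_lhs => unfold pvLoopA
  split <;> simp_all

lemma pvLoopA_false {t u : List Char} (h : pvPassA t = (u, false)) : pvLoopA t = u := by
  conv_lhs => unfold pvLoopA
  split <;> simp_all

lemma pvStrip_sandwich {a b : Char} (ha : PySem.Chars.isspace a = false)
    (hb : PySem.Chars.isspace b = false) (xs : List Char) :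
    PySem.Chars.strip (a :: xs ++ [b]) = a :: xs ++ [b] := by
  simp [PySem.Chars.strip, PySem.Chars.lstrip, PySem.Chars.rstrip, ha, hb,
    List.reverse_append]

lemma pvCut_append (m mid : List Char) (hm : m ≠ []) : pvCut m (m ++ mid ++ m) = mid := by
  have hn : 0 < m.length := List.length_pos_of_ne_nil hm
  have hlen : (m ++ mid ++ m).length = m.length + mid.length + m.length := by
    simp; omega
  simp only [pvCut, PySem.List.slice, PySem.List.clampIdx]
  have h1 : ¬ ((m.length : Int) < 0) := by omega
  have h2 : (-(m.length : Int)) < 0 := by omega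
  have h3 : ¬ (((m ++ mid ++ m).length : Int) + -(m.length : Int) < 0) := by omega
  have h4 : (((m ++ mid ++ m).length : Int) + -(m.length : Int)).toNat
      = m.length + mid.length := by omega
  have h5 : min (m.length : Int).toNat (m ++ mid ++ m).length = m.length := by
    rw [hlen]; omega
  rw [if_neg h1, if_pos h2, if_neg h3, h4, h5]
  have h6 : m.length + mid.length - m.length = mid.length := by omega
  rw [h6, show m ++ mid ++ m = m ++ (mid ++ m) by simp, List.drop_left' rfl]
  exact List.take_left' rfl

lemma pvMatches_ne_head {c d : Char} (hne : c ≠ d) (m r : List Char) :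
    pvMatches (c :: m) (d :: r) = false := by
  have h : ¬ ((c :: m) <+: (d :: r)) := fun hp => hne (List.cons_prefix_cons.mp hp).1
  simp [pvMatches, PySem.Chars.startswith, List.isPrefixOf_iff_prefix, h]

lemma pvMatches_one_intro {c : Char} (mid : List Char) (hne : mid ≠ []) :
    pvMatches [c] (c :: mid ++ [c]) = true := by
  have h3 : 0 < mid.length := List.length_pos_of_ne_nil hne
  simp only [pvMatches, Bool.and_eq_true, decide_eq_true_eq, PySem.Chars.startswith,
    PySem.Chars.endswith]
  refine ⟨⟨?_, ?_⟩, ?_⟩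
  · exact List.isPrefixOf_iff_prefix.mpr ⟨mid ++ [c], by simp⟩
  · exact List.isSuffixOf_iff_suffix.mpr ⟨c :: mid, by simp⟩
  · simp; omega

lemma pvMatches_one_decomp {c : Char} {t : List Char} (h : pvMatches [c] t = true) :
    ∃ mid, t = c :: mid ++ [c] ∧ mid ≠ [] := by
  simp only [pvMatches, PySem.Chars.startswith, PySem.Chars.endswith, Bool.and_eq_true,
    List.isPrefixOf_iff_prefix, List.isSuffixOf_iff_suffix, decide_eq_true_eq] at h
  obtain ⟨⟨hp, hs⟩, hl⟩ := h
  obtain ⟨r, hr⟩ := hp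
  obtain ⟨u, hu⟩ := hs
  subst hr
  simp at hl
  cases u with
  | nil =>
    exfalso
    simp at hu
    simp_all
  | cons x u' =>
    simp only [List.cons_append, List.cons.injEq] at hu
    have hlu := congrArg List.length hu.2
    simp only [List.length_append, List.length_cons, List.length_nil] at hlu
    exact ⟨u', by simp [← hu.2], List.ne_nil_of_length_pos (by omega)⟩

lemma pvMatches_two_decomp {c : Char} {t : List Char} (h : pvMatches [c, c] t = true) :
    ∃ mid, t = [c, c] ++ mid ++ [c, c] ∧ mid ≠ [] := by
  simp only [pvMatches, PySem.Chars.startswith, PySem.Chars.endswith, Bool.and_eq_true,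
    List.isPrefixOf_iff_prefix, List.isSuffixOf_iff_suffix, decide_eq_true_eq] at h
  obtain ⟨⟨hp, hs⟩, hl⟩ := h
  obtain ⟨r, hr⟩ := hp
  obtain ⟨u, hu⟩ := hs
  subst hr
  simp at hl
  cases u with
  | nil =>
    exfalso
    simp at hu
    simp_all
  | cons x u' =>
    cases u' with
    | nil =>
      exfalso
      simp at hu
      rcases hu with ⟨rfl, rfl⟩
      simp at hl
    | cons y u'' =>
      simp only [List.cons_append, List.cons.injEq, List.nil_append] at hu
      have hlu := congrArg List.length hu.2.2
      simp only [List.length_append, List.length_cons, List.length_nil] at hlu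
      exact ⟨u'', by simp [← hu.2.2], List.ne_nil_of_length_pos (by omega)⟩


lemma pvAux : ∀ (n : Nat) (c : Char) (mid : List Char), mid.length ≤ n →
    (c = '*' ∨ c = '_') → mid ≠ [] →
    pvNorm (c :: mid ++ [c]) = pvNorm (PySem.Chars.strip mid) := by
  intro n
  induction n with
  | zero =>
    intro c mid hlen _ hne
    exact absurd (List.length_eq_zero_iff.mp (Nat.le_zero.mp hlen)) hne
  | succ n ih =>
    intro c mid hlen hc hne
    have hsp : PySem.Chars.isspace c = false := by rcases hc with rfl | rfl <;> decide
    by_cases h2 : pvMatches [c, c] (c :: mid ++ [c]) = true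
    · obtain ⟨m₂, hs, hm₂⟩ := pvMatches_two_decomp h2
      have hmid : mid = c :: m₂ ++ [c] := by
        have h0 : c :: (mid ++ [c]) = c :: ((c :: m₂ ++ [c]) ++ [c]) := by
          simpa [List.append_assoc] using hs
        have h1 : mid ++ [c] = (c :: m₂ ++ [c]) ++ [c] := by
          have := congrArg List.tail h0; simpa using this
        exact List.append_cancel_right h1
      have hfm : pvFirstMarker (c :: mid ++ [c]) = some [c, c] := by
        rcases hc with rfl | rfl
        · unfold pvFirstMarker pvMarkers
          rw [List.find?_cons_of_pos (by simpa using h2)]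
        · have hA : pvMatches ['*','*'] ('_' :: mid ++ ['_']) = false :=
            pvMatches_ne_head (by decide) _ _
          unfold pvFirstMarker pvMarkers
          rw [List.find?_cons_of_neg (by simpa using hA),
            List.find?_cons_of_pos (by simpa using h2)]
      rw [pvNorm_some hfm]
      have hcut : pvCut [c, c] (c :: mid ++ [c]) = m₂ := by
        rw [show (c :: mid ++ [c]) = [c, c] ++ m₂ ++ [c, c] from hs]
        exact pvCut_append _ _ (by simp)
      rw [hcut]
      have hstrip : PySem.Chars.strip mid = mid := by
        rw [hmid]; exact pvStrip_sandwich hsp hsp m₂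
      rw [hstrip, hmid]
      have hlen2 : m₂.length ≤ n := by
        have := congrArg List.length hmid
        simp at this; omega
      exact (ih c m₂ hlen2 hc hm₂).symm
    · have h1 : pvMatches [c] (c :: mid ++ [c]) = true := pvMatches_one_intro mid hne
      have hfm : pvFirstMarker (c :: mid ++ [c]) = some [c] := by
        rcases hc with rfl | rfl
        · have hA : pvMatches ['_','_'] ('*' :: mid ++ ['*']) = false :=
            pvMatches_ne_head (by decide) _ _
          unfold pvFirstMarker pvMarkers
          rw [List.find?_cons_of_neg (by simpa using h2),
            List.find?_cons_of_neg (by simpa using hA),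
            List.find?_cons_of_pos (by simpa using h1)]
        · have hA : pvMatches ['*','*'] ('_' :: mid ++ ['_']) = false :=
            pvMatches_ne_head (by decide) _ _
          have hB : pvMatches ['*'] ('_' :: mid ++ ['_']) = false :=
            pvMatches_ne_head (by decide) _ _
          unfold pvFirstMarker pvMarkers
          rw [List.find?_cons_of_neg (by simpa using hA),
            List.find?_cons_of_neg (by simpa using h2),
            List.find?_cons_of_neg (by simpa using hB),
            List.find?_cons_of_pos (by simpa using h1)]
      rw [pvNorm_some hfm]
      have hcut : pvCut [c] (c :: mid ++ [c]) = mid := by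
        rw [show (c :: mid ++ [c]) = [c] ++ mid ++ [c] by simp]
        exact pvCut_append _ _ (by simp)
      rw [hcut]

lemma pvConf {m t : List Char} (hm : m ∈ pvMarkers) (h : pvMatches m t = true) :
    pvNorm (PySem.Chars.strip (pvCut m t)) = pvNorm t := by
  simp only [pvMarkers, List.mem_cons, List.not_mem_nil, or_false] at hm
  rcases hm with rfl | rfl | rfl | rfl
  · refine (pvNorm_some ?_).symm
    unfold pvFirstMarker pvMarkers
    rw [List.find?_cons_of_pos (by simpa using h)]
  · obtain ⟨mid, rfl, _⟩ := pvMatches_two_decomp h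
    have h0 : pvMatches ['*','*'] (['_','_'] ++ mid ++ ['_','_']) = false := by
      rw [show (['_','_'] ++ mid ++ ['_','_'] : List Char)
          = '_' :: (['_'] ++ mid ++ ['_','_']) by simp]
      exact pvMatches_ne_head (by decide) _ _
    refine (pvNorm_some ?_).symm
    unfold pvFirstMarker pvMarkers
    rw [List.find?_cons_of_neg (by simpa using h0),
      List.find?_cons_of_pos (by simpa using h)]
  · obtain ⟨mid, rfl, hne⟩ := pvMatches_one_decomp h
    have hcut : pvCut ['*'] ('*' :: mid ++ ['*']) = mid := by
      rw [show ('*' :: mid ++ ['*'] : List Char) = ['*'] ++ mid ++ ['*'] by simp]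
      exact pvCut_append _ _ (by simp)
    rw [hcut]
    exact (pvAux mid.length '*' mid le_rfl (Or.inl rfl) hne).symm
  · obtain ⟨mid, rfl, hne⟩ := pvMatches_one_decomp h
    have hcut : pvCut ['_'] ('_' :: mid ++ ['_']) = mid := by
      rw [show ('_' :: mid ++ ['_'] : List Char) = ['_'] ++ mid ++ ['_'] by simp]
      exact pvCut_append _ _ (by simp)
    rw [hcut]
    exact (pvAux mid.length '_' mid le_rfl (Or.inr rfl) hne).symm

-- continuation of A's while-loop after a pass, given the pass's result
def pvCont (r : List Char × Bool) : List Char :=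
  if r.2 then (if r.1 = [] then r.1 else pvLoopA r.1) else r.1

lemma pvLoopA_eq_cont (t : List Char) : pvLoopA t = pvCont (pvPassA t) := by
  rcases h : pvPassA t with ⟨u, b⟩
  cases b
  · rw [pvLoopA_false h]; simp [pvCont]
  · rw [pvLoopA_true h]; simp [pvCont]

lemma pvFoldTrueNorm : ∀ (ms : List (List Char)), (∀ m ∈ ms, m ∈ pvMarkers) →
    ∀ (N : Nat) (t : List Char), t.length < N →
    (∀ s : List Char, s.length < N → pvLoopA s = pvNorm s) →
    pvCont (List.foldl pvStepA (t, true) ms) = pvNorm t := by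
  intro ms
  induction ms with
  | nil =>
    intro _ N t hN IH
    simp only [List.foldl_nil, pvCont, if_true]
    by_cases ht : t = []
    · subst ht; simp [pvNorm_nil]
    · simp only [ht, if_false]
      exact IH t hN
  | cons m ms ih =>
    intro hmem N t hN IH
    simp only [List.foldl_cons]
    by_cases hm : pvMatches m t = true
    · simp only [pvStepA, hm, if_true]
      have hlt : (PySem.Chars.strip (pvCut m t)).length < N :=
        lt_trans (lt_of_le_of_lt (pvStrip_length_le _) (pvCut_length_lt hm)) hN
      rw [ih (fun m' hm' => hmem m' (List.mem_cons_of_mem _ hm')) N _ hlt IH]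
      exact pvConf (hmem m (by simp)) hm
    · rw [Bool.not_eq_true] at hm
      simp only [pvStepA, hm, if_false, Bool.false_eq_true]
      exact ih (fun m' hm' => hmem m' (List.mem_cons_of_mem _ hm')) N t hN IH

lemma pvFoldFalseNorm : ∀ (ms : List (List Char)), (∀ m ∈ ms, m ∈ pvMarkers) →
    ∀ (N : Nat) (t : List Char), t.length ≤ N →
    (∀ s : List Char, s.length < N → pvLoopA s = pvNorm s) →
    pvFirstMarker t = ms.find? (fun m => pvMatches m t) →
    pvCont (List.foldl pvStepA (t, false) ms) = pvNorm t := by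
  intro ms
  induction ms with
  | nil =>
    intro _ N t _ _ hfm
    simp only [List.foldl_nil, pvCont]
    exact (pvNorm_none (by simpa using hfm)).symm
  | cons m ms ih =>
    intro hmem N t hN IH hfm
    simp only [List.foldl_cons]
    by_cases hm : pvMatches m t = true
    · simp only [pvStepA, hm, if_true]
      have hlt : (PySem.Chars.strip (pvCut m t)).length < N :=
        lt_of_lt_of_le (lt_of_le_of_lt (pvStrip_length_le _) (pvCut_length_lt hm)) hN
      rw [pvFoldTrueNorm ms (fun m' hm' => hmem m' (List.mem_cons_of_mem _ hm')) N _ hlt IH]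
      have hfm' : pvFirstMarker t = some m := by
        rw [hfm, List.find?_cons_of_pos (by simpa using hm)]
      exact (pvNorm_some hfm').symm
    · rw [Bool.not_eq_true] at hm
      simp only [pvStepA, hm, if_false, Bool.false_eq_true]
      refine ih (fun m' hm' => hmem m' (List.mem_cons_of_mem _ hm')) N t hN IH ?_
      rw [hfm, List.find?_cons_of_neg (by simpa using hm)]

lemma pvLoopA_eq_norm : ∀ (N : Nat) (t : List Char), t.length < N → pvLoopA t = pvNorm t := by
  intro N
  induction N with
  | zero => intro t h; omega
  | succ N ih =>
    intro t hN
    rw [pvLoopA_eq_cont]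
    exact pvFoldFalseNorm pvMarkers (fun _ h => h) N t (by omega) ih rfl

lemma pvAltCore_eq_norm : ∀ (N : Nat) (l : List Char), l.length < N →
    pvAltCore l = pvNorm (PySem.Chars.strip l) := by
  intro N
  induction N with
  | zero => intro l h; omega
  | succ N ih =>
    intro l hl
    conv_lhs => unfold pvAltCore
    by_cases ht : PySem.Chars.strip l = []
    · simp [ht, pvNorm_nil]
    · simp only [ht, if_false]
      cases hfm : pvFirstMarker (PySem.Chars.strip l) with
      | none => rw [pvNorm_none hfm]
      | some m =>
        rw [pvNorm_some hfm]
        have hlt : (pvCut m (PySem.Chars.strip l)).length < N := by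
          have h1 := pvCut_length_lt (pvFirstMarker_matches hfm)
          have h2 := pvStrip_length_le l
          omega
        exact ih _ hlt

-- ===== VERDICT (by name: the statement is the Claim_ definition above) =====
theorem strip_markdown_wrappers_spec : Claim_equal_strip_markdown_wrappers := by
  intro text _
  unfold Spec_strip_markdown_wrappers strip_markdown_wrappers strip_markdown_wrappers_alt
  rw [pvAltCore_eq_norm (text.toList.length + 1) _ (by omega)]
  by_cases h : PySem.Chars.strip text.toList = []
  · rw [h]; simp [pvNorm_nil]
  · simp only [h, if_false]
    congr 1
    exact pvLoopA_eq_norm (text.toList.length + 1) _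
      (lt_of_le_of_lt (pvStrip_length_le _) (by omega))
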